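-- pv_equiv track=rewrite | github.com/daniel-reich/turbo-robot | hZ4HzhboCJ5dDiNve_3.py | special_reverse_string
-- ===== SOURCE A (Python) =====
-- def special_reverse_string(txt):
--     r = ""
--     key = txt
--     txt = iter([x.lower() for x in txt[::-1] if x != " "])
--     for y in key:
--         if y == " ":
--             r += " "
--         elif y.isupper():
--             r += next(txt).upper()
--         elif y.islower():
--             r += next(txt).lower()
--         else:
--             r += next(txt)
--     return r
-- ===== SOURCE B (Python) =====
-- def special_reverse_string(txt):
--     # Two-pointer in-place reversal of the non-space characters (swapping from
--     # both ends, skipping spaces), then a re-casing pass driven by the original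
--     # characters.
--     s = list(txt)
--     i, j = 0, len(s) - 1
--     while i < j:
--         if s[i] == ' ':
--             i += 1
--         elif s[j] == ' ':
--             j -= 1
--         else:
--             s[i], s[j] = s[j], s[i]
--             i += 1
--             j -= 1
--     return ''.join(
--         c if c == ' ' else (s[k].upper() if c.isupper() else s[k].lower())
--         for k, c in enumerate(txt))
-- ===== Notes on version B (the rewrite author's own statement) =====
-- stated objective: alternative
-- what changed: B discards A's reverse-slice + pre-lowercased iterator consumed in a three-branch casing loop: it reverses the non-space characters IN PLACE with a two-pointer swap loop (skipping spaces from both ends), then re-cases each swapped character by the original character in a second pass (upper if the original was upper, else lower).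
import Mathlib
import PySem

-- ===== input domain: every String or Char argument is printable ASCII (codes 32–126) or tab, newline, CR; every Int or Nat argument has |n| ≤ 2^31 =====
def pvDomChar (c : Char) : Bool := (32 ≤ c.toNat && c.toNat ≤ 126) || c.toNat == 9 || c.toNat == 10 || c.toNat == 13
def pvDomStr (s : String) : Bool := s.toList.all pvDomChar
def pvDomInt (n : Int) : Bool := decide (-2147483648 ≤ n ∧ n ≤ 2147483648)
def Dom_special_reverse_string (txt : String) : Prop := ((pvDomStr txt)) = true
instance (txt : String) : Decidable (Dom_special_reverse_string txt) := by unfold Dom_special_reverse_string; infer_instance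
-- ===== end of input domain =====

-- B replaces A's reverse-slice + pre-lowered iterator by an in-place two-pointer
-- swap of the non-space characters followed by a re-casing pass
-- (objective: alternative algorithm, same O(n) cost).

-- ===== PORT A =====
-- the 'for y in key' loop: consumes the iterator 'it' from the front; the [] iterator
-- case is Python's StopIteration, unreachable because the iterator holds exactly one
-- character per non-space character of key.
def srsLoopA : List Char → List Char → List Char
  | [], _ => []
  | y :: ys, it =>
    if y = ' ' then ' ' :: srsLoopA ys it
    else
      match it with
      | [] => []  -- StopIteration (unreachable)
      | c :: it' =>
        (if PySem.Chars.isupper y then PySem.Chars.upperChar c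
         else if PySem.Chars.islower y then PySem.Chars.lowerChar c
         else c) :: srsLoopA ys it'

def special_reverse_string (txt : String) : String :=
  let key := txt.toList
  -- txt[::-1] ported as PySem slice with step -1 (step ≠ 0, so always some)
  let rev := (PySem.List.slice? key none none (-1)).getD []
  -- [x.lower() for x in txt[::-1] if x != " "]
  let it := (rev.filter (fun x => x ≠ ' ')).map PySem.Chars.lowerChar
  String.ofList (srsLoopA key it)

-- ===== PORT B =====
-- the 'while i < j' two-pointer swap loop of Source B; i, j carried as Nat
-- (Python's j = len-1 is -1 only for the empty string, where the loop does not
-- run in either version, so Nat truncation to 0 is behaviourally identical).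
def srsTP (s : List Char) (i j : Nat) : List Char :=
  if _h : i < j then
    if s.getD i ' ' = ' ' then srsTP s (i + 1) j
    else if s.getD j ' ' = ' ' then srsTP s i (j - 1)
    else srsTP ((s.set i (s.getD j ' ')).set j (s.getD i ' ')) (i + 1) (j - 1)
  else s
termination_by j - i
decreasing_by all_goals omega

def special_reverse_string_alt (txt : String) : String :=
  let s := srsTP txt.toList 0 (txt.toList.length - 1)
  -- the join-genexpr over enumerate(txt) with lookups s[k] = zipWith over the pair
  String.ofList (List.zipWith
    (fun c sk => if c = ' ' then c
                 else if PySem.Chars.isupper c then PySem.Chars.upperChar sk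
                 else PySem.Chars.lowerChar sk)
    txt.toList s)

-- ===== PRECONDITION & SPEC =====
def Spec_special_reverse_string (txt : String) (out : String) : Prop := out = special_reverse_string_alt txt
instance (txt : String) (out : String) : Decidable (Spec_special_reverse_string txt out) := by unfold Spec_special_reverse_string; infer_instance

-- ===== CLAIM (what is proved, stated in full; the proofs are below) =====
def Claim_equal_special_reverse_string : Prop := ∀ (txt : String), Dom_special_reverse_string txt → Spec_special_reverse_string txt (special_reverse_string txt)

-- ===== LEMMAS AND PROOFS =====

-- number of non-space characters
def srsCount (m : List Char) : Nat := (m.filter (fun c => c ≠ ' ')).length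

-- scatter the letters L into the non-space slots of m, in order
def srsPlace : List Char → List Char → List Char
  | [], _ => []
  | c :: cs, L =>
    if c = ' ' then ' ' :: srsPlace cs L
    else match L with
      | [] => c :: srsPlace cs []
      | l :: L' => l :: srsPlace cs L'

-- m with its non-space characters reversed in place
def srsRev (m : List Char) : List Char :=
  srsPlace m ((m.filter (fun c => c ≠ ' ')).reverse)

lemma srsPlace_append (m zs L : List Char) :
    srsPlace (m ++ zs) L = srsPlace m L ++ srsPlace zs (L.drop (srsCount m)) := by
  induction m generalizing L with
  | nil => simp [srsPlace, srsCount]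
  | cons c cs ih =>
    by_cases hc : c = ' '
    · simp [srsPlace, hc, ih, srsCount, List.filter]
    · cases L with
      | nil => simp [srsPlace, hc, ih, srsCount]
      | cons l L' =>
        simp [srsPlace, hc, ih, srsCount, List.filter, List.length_cons]

lemma srsRev_nil : srsRev [] = [] := rfl

lemma srsRev_space_cons (m : List Char) : srsRev (' ' :: m) = ' ' :: srsRev m := by
  simp [srsRev, srsPlace, List.filter]

lemma srsRev_single (c : Char) : srsRev [c] = [c] := by
  by_cases hc : c = ' ' <;> simp [srsRev, srsPlace, List.filter, hc]

lemma srsRev_append_space (m : List Char) : srsRev (m ++ [' ']) = srsRev m ++ [' '] := by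
  unfold srsRev
  rw [List.filter_append, srsPlace_append]
  simp [srsPlace, List.filter]

lemma srsPlace_extra (m L E : List Char) (h : srsCount m ≤ L.length) :
    srsPlace m (L ++ E) = srsPlace m L := by
  induction m generalizing L with
  | nil => simp [srsPlace]
  | cons c cs ih =>
    by_cases hc : c = ' '
    · simp only [srsPlace, if_pos hc]
      rw [ih L (by simpa [srsCount, List.filter, hc] using h)]
    · cases L with
      | nil => simp [srsCount, List.filter, hc] at h
      | cons l L' =>
        simp only [srsPlace, if_neg hc, List.cons_append]
        rw [ih L' (by simpa [srsCount, List.filter, hc] using h)]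

lemma srsRev_swap (a b : Char) (m : List Char) (ha : a ≠ ' ') (hb : b ≠ ' ') :
    srsRev (a :: (m ++ [b])) = b :: (srsRev m ++ [a]) := by
  unfold srsRev
  have hf : ((a :: (m ++ [b])).filter (fun c => c ≠ ' ')).reverse
      = b :: ((m.filter (fun c => c ≠ ' ')).reverse ++ [a]) := by
    simp [List.filter_append, List.filter, ha, hb]
  rw [hf]
  have h1 : srsPlace (a :: (m ++ [b])) (b :: ((m.filter (fun c => c ≠ ' ')).reverse ++ [a]))
      = b :: srsPlace (m ++ [b]) ((m.filter (fun c => c ≠ ' ')).reverse ++ [a]) := by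
    simp [srsPlace, ha]
  rw [h1, srsPlace_append m [b] _, srsPlace_extra m _ [a] (by simp [srsCount])]
  have h2 : ((m.filter (fun c => c ≠ ' ')).reverse ++ [a]).drop (srsCount m) = [a] := by
    rw [List.drop_append, List.drop_eq_nil_of_le (by simp [srsCount])]
    simp [srsCount]
  rw [h2]
  simp [srsPlace, hb]

-- setting at the length of the prefix
lemma srsSet_len (p : List Char) (x y : Char) (r : List Char) :
    (p ++ x :: r).set p.length y = p ++ y :: r := by
  induction p with
  | nil => simp
  | cons c cs ih => simp [List.set, ih]

-- the two-pointer loop computes 'reverse-non-spaces in place' on the window [i, j]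
lemma srsTP_eq (s : List Char) (i j : Nat) :
    i ≤ j + 1 → j < s.length →
    srsTP s i j = s.take i ++ srsRev ((s.drop i).take (j + 1 - i)) ++ s.drop (j + 1) := by
  intro h1 h2
  induction s, i, j using srsTP.induct with
  | case1 s i j hij hsp ih =>
    -- s[i] = ' '
    have hi : i < s.length := by omega
    have hget : s.getD i ' ' = s[i] := List.getD_eq_getElem s ' ' hi
    have hsi : s[i] = ' ' := by rw [← hget]; exact hsp
    rw [srsTP]; simp only [hij, dif_pos, hsp, if_pos]
    rw [ih (by omega) h2]
    have hdrop : s.drop i = s[i] :: s.drop (i + 1) := List.drop_eq_getElem_cons hi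
    have htake : (s.drop i).take (j + 1 - i) = s[i] :: (s.drop (i + 1)).take (j - i) := by
      rw [hdrop]
      have : j + 1 - i = (j - i) + 1 := by omega
      rw [this, List.take_succ_cons]
    have htk : s.take (i + 1) = s.take i ++ [s[i]] := by
      rw [List.take_succ, List.getElem?_eq_getElem hi]; simp
    rw [htake, hsi, srsRev_space_cons, htk, hsi]
    have : j + 1 - (i + 1) = j - i := by omega
    rw [this]
    simp
  | case2 s i j hij hsp hspj ih =>
    -- s[j] = ' '
    have hi : i < s.length := by omega
    have hj : j < s.length := h2
    have hgetj : s.getD j ' ' = s[j] := List.getD_eq_getElem s ' ' hj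
    have hsj : s[j] = ' ' := by rw [← hgetj]; exact hspj
    rw [srsTP]; simp only [hij, dif_pos, hsp, if_neg, hspj, if_pos]
    rw [ih (by omega) (by omega)]
    have hgd : j - i < (s.drop i).length := by rw [List.length_drop]; omega
    have hidx : (s.drop i)[j - i]'hgd = s[j] := by
      rw [List.getElem_drop]; congr 1; omega
    have htake : (s.drop i).take (j + 1 - i) = (s.drop i).take (j - i) ++ [s[j]] := by
      have h1' : j + 1 - i = (j - i) + 1 := by omega
      rw [h1', List.take_succ, List.getElem?_eq_getElem hgd, hidx]
      simp
    have hdj : s.drop j = s[j] :: s.drop (j + 1) := List.drop_eq_getElem_cons hj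
    have hje : j - 1 + 1 = j := by omega
    rw [hje, htake, hsj, srsRev_append_space, hdj, hsj]
    simp
  | case3 s i j hij hsp hspj ih =>
    -- swap case
    have hi : i < s.length := by omega
    have hj : j < s.length := h2
    obtain ⟨a, ha⟩ : ∃ x, s[i] = x := ⟨_, rfl⟩
    obtain ⟨b, hb⟩ : ∃ x, s[j] = x := ⟨_, rfl⟩
    have hgeti : s.getD i ' ' = a := by rw [List.getD_eq_getElem s ' ' hi, ha]
    have hgetj : s.getD j ' ' = b := by rw [List.getD_eq_getElem s ' ' hj, hb]
    have hai : a ≠ ' ' := by rw [← hgeti]; exact hsp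
    have hbj : b ≠ ' ' := by rw [← hgetj]; exact hspj
    obtain ⟨p, hp⟩ : ∃ x, s.take i = x := ⟨_, rfl⟩
    obtain ⟨m, hm⟩ : ∃ x, (s.drop (i + 1)).take (j - i - 1) = x := ⟨_, rfl⟩
    obtain ⟨q, hq⟩ : ∃ x, s.drop (j + 1) = x := ⟨_, rfl⟩
    have hplen : p.length = i := by rw [← hp, List.length_take]; omega
    have hmlen : m.length = j - i - 1 := by
      rw [← hm, List.length_take, List.length_drop]; omega
    have hdropj : s.drop j = b :: q := by
      rw [← hq, ← hb]; exact List.drop_eq_getElem_cons hj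
    have hdrops : s.drop (i + 1) = m ++ b :: q := by
      rw [← hm, ← hdropj]
      have h' : s.drop j = (s.drop (i + 1)).drop (j - i - 1) := by
        rw [List.drop_drop]; congr 1; omega
      rw [h', List.take_append_drop]
    have hs : s = p ++ a :: (m ++ b :: q) := by
      conv_lhs => rw [← List.take_append_drop i s]
      rw [List.drop_eq_getElem_cons hi, hdrops, ha, hp]
    have hset2 : (s.set i (s.getD j ' ')).set j (s.getD i ' ') = p ++ b :: (m ++ a :: q) := by
      rw [hgeti, hgetj]
      conv_lhs => rw [hs]
      rw [← hplen, srsSet_len]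
      have heq : p ++ b :: (m ++ b :: q) = (p ++ b :: m) ++ b :: q := by simp
      have hlen2 : (p ++ b :: m).length = p.length + 1 + m.length := by simp; omega
      have hlen3 : p.length + 1 + m.length = j := by rw [hplen, hmlen]; omega
      rw [heq, ← hlen3, ← hlen2, srsSet_len]
      simp
    rw [srsTP]
    simp only [hij, dif_pos, if_neg hsp, if_neg hspj]
    rw [ih (by omega) (by simp only [List.length_set]; omega), hset2]
    have h1' : (p ++ b :: (m ++ a :: q)).take (i + 1) = p ++ [b] := by
      rw [List.take_append, List.take_of_length_le (by omega), hplen]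
      have h' : i + 1 - i = 1 := by omega
      rw [h']
      simp
    have h2' : (p ++ b :: (m ++ a :: q)).drop (i + 1) = m ++ a :: q := by
      rw [List.drop_append, List.drop_eq_nil_of_le (by omega), hplen]
      have h' : i + 1 - i = 1 := by omega
      rw [h']
      simp
    have h3' : ((p ++ b :: (m ++ a :: q)).drop (i + 1)).take (j - 1 + 1 - (i + 1)) = m := by
      rw [h2']
      have h' : j - 1 + 1 - (i + 1) = j - i - 1 := by omega
      rw [h', List.take_append, List.take_of_length_le (by omega), hmlen]
      have h'' : j - i - 1 - (j - i - 1) = 0 := by omega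
      rw [h'']
      simp
    have h4' : (p ++ b :: (m ++ a :: q)).drop (j - 1 + 1) = a :: q := by
      have heq : p ++ b :: (m ++ a :: q) = (p ++ b :: m) ++ a :: q := by simp
      have hlen2 : (p ++ b :: m).length = i + 1 + m.length := by simp [hplen]; omega
      have hje : j - 1 + 1 = j := by omega
      rw [hje, heq, List.drop_append, List.drop_eq_nil_of_le (by rw [hlen2, hmlen]; omega),
        hlen2, hmlen]
      have h'' : j - (i + 1 + (j - i - 1)) = 0 := by omega
      rw [h'']
      simp
    rw [h1', h3', h4']
    have htake : (s.drop i).take (j + 1 - i) = a :: (m ++ [b]) := by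
      rw [List.drop_eq_getElem_cons hi, ha, hdrops]
      have h' : j + 1 - i = (j - i - 1 + 1) + 1 := by omega
      rw [h', List.take_succ_cons]
      congr 1
      rw [List.take_append, List.take_of_length_le (by omega), hmlen]
      have h'' : j - i - 1 + 1 - (j - i - 1) = 1 := by omega
      rw [h'']
      simp
    rw [htake, srsRev_swap a b m hai hbj, hp, hq]
    simp
  | case4 s i j hij =>
    rw [srsTP, dif_neg hij]
    rcases (by omega : i = j ∨ i = j + 1) with h | h
    · subst h
      have hi : i < s.length := h2
      have h1' : i + 1 - i = 1 := by omega
      rw [h1', List.drop_eq_getElem_cons hi, List.take_succ_cons, List.take_zero, srsRev_single]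
      have htk : s.take (i + 1) = s.take i ++ [s[i]] := by
        rw [List.take_succ, List.getElem?_eq_getElem hi]; simp
      conv_rhs => rw [← htk, List.take_append_drop]
    · subst h
      have h1' : j + 1 - (j + 1) = 0 := by omega
      rw [h1']
      simp only [List.take_zero, srsRev_nil, List.nil_append, List.append_nil]
      exact (List.take_append_drop (j + 1) s).symm

-- pointwise ASCII facts, decided over the 127 character codes the domain allows
set_option maxRecDepth 8192 in
lemma srs_upper_lower_range : ∀ n ∈ List.range 127,
    PySem.Chars.upperChar (PySem.Chars.lowerChar (Char.ofNat n)) = PySem.Chars.upperChar (Char.ofNat n) := by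
  decide

set_option maxRecDepth 8192 in
lemma srs_lower_lower_range : ∀ n ∈ List.range 127,
    PySem.Chars.lowerChar (PySem.Chars.lowerChar (Char.ofNat n)) = PySem.Chars.lowerChar (Char.ofNat n) := by
  decide

lemma srs_dom_lt (c : Char) (hc : pvDomChar c = true) : c.toNat ∈ List.range 127 := by
  simp only [pvDomChar, Bool.or_eq_true, Bool.and_eq_true, decide_eq_true_eq, beq_iff_eq] at hc
  simp only [List.mem_range]
  omega

lemma srs_upper_lower (c : Char) (hc : pvDomChar c = true) :
    PySem.Chars.upperChar (PySem.Chars.lowerChar c) = PySem.Chars.upperChar c := by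
  have := srs_upper_lower_range c.toNat (srs_dom_lt c hc)
  simpa [Char.ofNat_toNat] using this

lemma srs_lower_lower (c : Char) (hc : pvDomChar c = true) :
    PySem.Chars.lowerChar (PySem.Chars.lowerChar c) = PySem.Chars.lowerChar c := by
  have := srs_lower_lower_range c.toNat (srs_dom_lt c hc)
  simpa [Char.ofNat_toNat] using this

-- A's loop over the lowered letter stream equals B's re-casing pass over the
-- letters scattered back into the non-space slots.
lemma srs_loopA_eq_zip (m L : List Char)
    (hlen : L.length = (m.filter (fun c => c ≠ ' ')).length)
    (hdom : ∀ c ∈ L, pvDomChar c = true) :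
    srsLoopA m (L.map PySem.Chars.lowerChar)
      = List.zipWith
          (fun c sk => if c = ' ' then c
                       else if PySem.Chars.isupper c then PySem.Chars.upperChar sk
                       else PySem.Chars.lowerChar sk)
          m (srsPlace m L) := by
  induction m generalizing L with
  | nil => simp [srsLoopA, srsPlace]
  | cons y ys ih =>
    by_cases hy : y = ' '
    · subst hy
      simp only [srsLoopA, if_pos rfl, srsPlace]
      rw [ih L (by simpa using hlen) hdom]
      simp
    · cases L with
      | nil => simp [hy, List.filter] at hlen
      | cons l L' =>
        have hld : pvDomChar l = true := hdom l (by simp)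
        simp only [srsLoopA, if_neg hy, List.map_cons, srsPlace, List.zipWith_cons_cons]
        rw [ih L' (by simpa [List.filter, hy] using hlen) (fun d hd => hdom d (by simp [hd]))]
        congr 1
        by_cases h1 : PySem.Chars.isupper y
        · simp [hy, h1, srs_upper_lower l hld]
        · by_cases h2 : PySem.Chars.islower y
          · simp [hy, h1, h2, srs_lower_lower l hld]
          · simp [hy, h1, h2]

-- ===== VERDICT (by name: the statement is the Claim_ definition above) =====
theorem special_reverse_string_spec : Claim_equal_special_reverse_string := by
  intro txt hdom
  unfold Spec_special_reverse_string special_reverse_string special_reverse_string_alt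
  simp only [PySem.List.slice?_none_none_neg_one, Option.getD_some, List.filter_reverse]
  set key := txt.toList with hkey
  have hdom' : ∀ c ∈ (key.filter (fun c => c ≠ ' ')).reverse, pvDomChar c = true := by
    intro c hc
    have hmem : c ∈ key := List.mem_of_mem_filter (List.mem_reverse.mp hc)
    unfold Dom_special_reverse_string pvDomStr at hdom
    exact List.all_eq_true.mp hdom c hmem
  rcases List.eq_nil_or_concat key with hnil | ⟨_, _, hcc⟩
  · rw [hnil]; rfl
  · have hne : key ≠ [] := by rw [hcc]; simp
    have hlen : 1 ≤ key.length := by rw [hcc]; simp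
    have htp : srsTP key 0 (key.length - 1) = srsRev key := by
      rw [srsTP_eq key 0 (key.length - 1) (by omega) (by omega)]
      have : key.length - 1 + 1 - 0 = key.length := by omega
      rw [this]
      have h' : key.length - 1 + 1 = key.length := by omega
      rw [h']
      simp [srsRev]
    rw [htp]
    unfold srsRev
    rw [srs_loopA_eq_zip key ((key.filter (fun c => c ≠ ' ')).reverse)
      (by simp) hdom']
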